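-- pv_equiv track=rewrite | github.com/IMAbril/LCD_UBA | LaboDatos-Verano2024/clase2.py | traductor_geringoso
-- ===== SOURCE A (Python) =====
-- def traductor_geringoso(lista):
--     claves = lista.copy()
--     valores = []
--     for clave in lista:
--         valor = ''
--         for letra in clave:
--             if letra.lower() in 'aeiou':
--                 valor += letra + 'p' + letra
--             else:
--                 valor += letra
--         valores.append(valor)
--     diccionario = dict(zip(claves, valores))
--     return diccionario
-- ===== SOURCE B (Python) =====
-- def traductor_geringoso(lista):
--     import re
--     return {palabra: re.sub(r'([aeiouAEIOU])', r'\1p\1', palabra) for palabra in lista}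
-- ===== Notes on version B (the rewrite author's own statement) =====
-- stated objective: idiomatic
-- what changed: Replaces the four parallel structures (copied key list, accumulator list, char-by-char string concatenation loop, zip+dict) with a single dict comprehension whose value is one regex substitution that duplicates each vowel around a 'p'.
import Mathlib
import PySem

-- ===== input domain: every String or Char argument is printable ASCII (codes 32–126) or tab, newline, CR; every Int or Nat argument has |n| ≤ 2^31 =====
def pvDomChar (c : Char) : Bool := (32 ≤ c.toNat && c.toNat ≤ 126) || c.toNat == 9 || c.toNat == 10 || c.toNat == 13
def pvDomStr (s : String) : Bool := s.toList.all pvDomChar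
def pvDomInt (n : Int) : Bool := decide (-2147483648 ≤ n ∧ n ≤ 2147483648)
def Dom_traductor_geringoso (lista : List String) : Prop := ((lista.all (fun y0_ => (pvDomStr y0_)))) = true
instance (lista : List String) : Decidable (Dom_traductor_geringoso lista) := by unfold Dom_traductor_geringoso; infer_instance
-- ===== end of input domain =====

-- B replaces A's four structures (copied key list, value accumulator list, per-character
-- concatenation loop, zip+dict) by one dict comprehension whose value is a single regex
-- substitution duplicating each vowel around a 'p' (objective: idiomatic).

-- ===== PORT A =====
-- 'letra.lower() in "aeiou"': membership of a ONE-character string in "aeiou" is exactly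
-- membership of the (lowered) character in its character list — exact here.
def traductor_geringoso (lista : List String) : List (String × String) :=
  let claves := lista          -- lista.copy()
  let valores := lista.foldl (fun valores clave =>
      let valor := clave.toList.foldl (fun valor letra =>
          if "aeiou".toList.contains (PySem.Chars.lowerChar letra) then
            valor ++ String.ofList [letra, 'p', letra]   -- valor += letra + 'p' + letra
          else
            valor ++ String.ofList [letra]) ""           -- valor += letra
      valores ++ [valor]) []
  (PySem.Dict.ofList (claves.zip valores)).items          -- dict(zip(claves, valores))

-- ===== PORT B =====
-- re.sub(r'([aeiouAEIOU])', r'\1p\1', palabra): the pattern is a single-character class, so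
-- this regex substitution is exactly the per-character expansion below (exact on all strings).
def pvSubVowel (palabra : String) : String :=
  String.ofList (palabra.toList.flatMap (fun c =>
    if "aeiouAEIOU".toList.contains c then [c, 'p', c] else [c]))

def traductor_geringoso_alt (lista : List String) : List (String × String) :=
  (lista.foldl (fun d palabra => d.insert palabra (pvSubVowel palabra)) PySem.Dict.empty).items

-- ===== PRECONDITION & SPEC =====
def Spec_traductor_geringoso (lista : List String) (out : List (String × String)) : Prop := out = traductor_geringoso_alt lista
instance (lista : List String) (out : List (String × String)) : Decidable (Spec_traductor_geringoso lista out) := by unfold Spec_traductor_geringoso; infer_instance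

-- ===== CLAIM (what is proved, stated in full; the proofs are below) =====
def Claim_equal_traductor_geringoso : Prop := ∀ (lista : List String), Dom_traductor_geringoso lista → Spec_traductor_geringoso lista (traductor_geringoso lista)

-- ===== LEMMAS AND PROOFS =====

-- A's case-insensitive vowel test agrees with B's explicit character class, for EVERY Char
-- (PySem.Chars.lowerChar only maps 'A'..'Z').
lemma pv_vowel_eq (c : Char) :
    ("aeiou".toList.contains (PySem.Chars.lowerChar c))
      = ("aeiouAEIOU".toList.contains c) := by
  rw [show "aeiou".toList = ['a','e','i','o','u'] from rfl,
      show "aeiouAEIOU".toList = ['a','e','i','o','u','A','E','I','O','U'] from rfl]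
  have hEq : ∀ (x d : Char), x = d ↔ x.toNat = d.toNat := by
    intro x d
    exact ⟨fun h => h ▸ rfl, fun h => Char.ext (UInt32.toNat_inj.mp h)⟩
  have h65 : ('A':Char).val.toNat = 65 := rfl
  have h90 : ('Z':Char).val.toNat = 90 := rfl
  have hcv : c.val.toNat = c.toNat := rfl
  have lit : (('a':Char).toNat = 97) ∧ (('e':Char).toNat = 101) ∧ (('i':Char).toNat = 105) ∧
      (('o':Char).toNat = 111) ∧ (('u':Char).toNat = 117) ∧ (('A':Char).toNat = 65) ∧
      (('E':Char).toNat = 69) ∧ (('I':Char).toNat = 73) ∧ (('O':Char).toNat = 79) ∧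
      (('U':Char).toNat = 85) := by decide
  obtain ⟨l1,l2,l3,l4,l5,l6,l7,l8,l9,l10⟩ := lit
  simp only [PySem.Chars.lowerChar, PySem.Chars.isupper, List.contains_eq_mem, List.mem_cons,
    List.not_mem_nil, or_false, decide_eq_decide, Char.le_def, UInt32.le_iff_toNat_le,
    h65, h90, hcv]
  split_ifs with h
  · rw [Bool.and_eq_true, decide_eq_true_iff, decide_eq_true_iff] at h
    have hv : Nat.isValidChar (c.toNat + 32) := Or.inl (by omega)
    have ht : (Char.ofNat (c.toNat + 32)).toNat = c.toNat + 32 := by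
      rw [Char.toNat_ofNat, if_pos hv]
    simp only [hEq, ht, l1,l2,l3,l4,l5,l6,l7,l8,l9,l10]
    omega
  · rw [Bool.and_eq_true, not_and_or] at h
    simp only [decide_eq_true_iff, not_le] at h
    simp only [hEq, l1,l2,l3,l4,l5,l6,l7,l8,l9,l10]
    omega

-- A's inner character loop builds exactly B's flatMap expansion.
lemma pv_inner_eq (cs : List Char) (acc : String) :
    cs.foldl (fun valor letra =>
        if "aeiou".toList.contains (PySem.Chars.lowerChar letra) then
          valor ++ String.ofList [letra, 'p', letra]
        else
          valor ++ String.ofList [letra]) acc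
      = acc ++ String.ofList (cs.flatMap (fun c =>
          if "aeiouAEIOU".toList.contains c then [c, 'p', c] else [c])) := by
  induction cs generalizing acc with
  | nil => simp
  | cons c cs ih =>
    rw [List.foldl_cons, ih, pv_vowel_eq, List.flatMap_cons, String.ofList_append]
    split_ifs <;> rw [String.append_assoc]

-- A's outer loop over lista produces the per-word translations of B.
lemma pv_valores_eq (lista : List String) (acc : List String) :
    lista.foldl (fun valores clave =>
        valores ++ [clave.toList.foldl (fun valor letra =>
            if "aeiou".toList.contains (PySem.Chars.lowerChar letra) then
              valor ++ String.ofList [letra, 'p', letra]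
            else
              valor ++ String.ofList [letra]) ""])
      acc
      = acc ++ lista.map pvSubVowel := by
  induction lista generalizing acc with
  | nil => simp
  | cons w ws ih =>
    rw [List.foldl_cons, ih, pv_inner_eq, List.map_cons]
    simp only [pvSubVowel, String.empty_append, List.append_assoc, List.singleton_append]

-- zipping a list with its own map lists the graph pairs directly.
lemma pv_zip_map (lista : List String) :
    lista.zip (lista.map pvSubVowel) = lista.map (fun w => (w, pvSubVowel w)) := by
  induction lista with
  | nil => rfl
  | cons w ws ih => simp [ih]

-- ===== VERDICT (by name: the statement is the Claim_ definition above) =====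
theorem traductor_geringoso_spec : Claim_equal_traductor_geringoso := by
  intro lista _
  unfold Spec_traductor_geringoso traductor_geringoso traductor_geringoso_alt
  simp only [pv_valores_eq, List.nil_append]
  rw [PySem.Dict.ofList, PySem.Dict.update, pv_zip_map, List.foldl_map]
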